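-- pv_equiv track=rewrite | github.com/P8UXaE/light_sheet_domes | dottamine/dottamine/dottamine/dottamine_class.py | bresenham_line_3d
-- ===== SOURCE A (Python) =====
-- def bresenham_line_3d(x1, y1, z1, x2, y2, z2):
--     ListOfPoints = []
--     ListOfPoints.append((x1, y1, z1))
--     dx = abs(x2 - x1)
--     dy = abs(y2 - y1)
--     dz = abs(z2 - z1)
--     if (x2 > x1):
--         xs = 1
--     else:
--         xs = -1
--     if (y2 > y1):
--         ys = 1
--     else:
--         ys = -1
--     if (z2 > z1):
--         zs = 1
--     else:
--         zs = -1
--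
--     # Driving axis is X-axis"
--     if (dx >= dy and dx >= dz):
--         p1 = 2 * dy - dx
--         p2 = 2 * dz - dx
--         while (x1 != x2):
--             x1 += xs
--             if (p1 >= 0):
--                 y1 += ys
--                 p1 -= 2 * dx
--             if (p2 >= 0):
--                 z1 += zs
--                 p2 -= 2 * dx
--             p1 += 2 * dy
--             p2 += 2 * dz
--             ListOfPoints.append((x1, y1, z1))
--
--     # Driving axis is Y-axis"
--     elif (dy >= dx and dy >= dz):
--         p1 = 2 * dx - dy
--         p2 = 2 * dz - dy
--         while (y1 != y2):
--             y1 += ys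
--             if (p1 >= 0):
--                 x1 += xs
--                 p1 -= 2 * dy
--             if (p2 >= 0):
--                 z1 += zs
--                 p2 -= 2 * dy
--             p1 += 2 * dx
--             p2 += 2 * dz
--             ListOfPoints.append((x1, y1, z1))
--
--     # Driving axis is Z-axis"
--     else:
--         p1 = 2 * dy - dz
--         p2 = 2 * dx - dz
--         while (z1 != z2):
--             z1 += zs
--             if (p1 >= 0):
--                 y1 += ys
--                 p1 -= 2 * dz
--             if (p2 >= 0):
--                 x1 += xs
--                 p2 -= 2 * dz
--             p1 += 2 * dy
--             p2 += 2 * dx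
--             ListOfPoints.append((x1, y1, z1))
--
--     return ListOfPoints
-- ===== SOURCE B (Python) =====
-- def bresenham_line_3d(x1, y1, z1, x2, y2, z2):
--     if x1 == x2 and y1 == y2 and z1 == z2:
--         return [(x1, y1, z1)]
--     dx = abs(x2 - x1)
--     dy = abs(y2 - y1)
--     dz = abs(z2 - z1)
--     sx = 1 if x2 > x1 else -1
--     sy = 1 if y2 > y1 else -1
--     sz = 1 if z2 > z1 else -1
--     if dx >= dy and dx >= dz:
--         n = dx
--         return [(x1 + sx * k,
--                  y1 + sy * ((2 * dy * k + n) // (2 * n)),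
--                  z1 + sz * ((2 * dz * k + n) // (2 * n)))
--                 for k in range(n + 1)]
--     elif dy >= dx and dy >= dz:
--         n = dy
--         return [(x1 + sx * ((2 * dx * k + n) // (2 * n)),
--                  y1 + sy * k,
--                  z1 + sz * ((2 * dz * k + n) // (2 * n)))
--                 for k in range(n + 1)]
--     else:
--         n = dz
--         return [(x1 + sx * ((2 * dx * k + n) // (2 * n)),
--                  y1 + sy * ((2 * dy * k + n) // (2 * n)),
--                  z1 + sz * k)
--                 for k in range(n + 1)]
-- ===== Notes on version B (the rewrite author's own statement) =====
-- stated objective: alternative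
-- what changed: B replaces A's three stateful Bresenham error-accumulator while-loops by a direct per-step closed-form: each minor coordinate is computed as start + sign*((2*d*k + N)//(2*N)) (round-half-up integer interpolation) over k in range(N+1), with the same driving-axis/tie and sign conventions.
import Mathlib
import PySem

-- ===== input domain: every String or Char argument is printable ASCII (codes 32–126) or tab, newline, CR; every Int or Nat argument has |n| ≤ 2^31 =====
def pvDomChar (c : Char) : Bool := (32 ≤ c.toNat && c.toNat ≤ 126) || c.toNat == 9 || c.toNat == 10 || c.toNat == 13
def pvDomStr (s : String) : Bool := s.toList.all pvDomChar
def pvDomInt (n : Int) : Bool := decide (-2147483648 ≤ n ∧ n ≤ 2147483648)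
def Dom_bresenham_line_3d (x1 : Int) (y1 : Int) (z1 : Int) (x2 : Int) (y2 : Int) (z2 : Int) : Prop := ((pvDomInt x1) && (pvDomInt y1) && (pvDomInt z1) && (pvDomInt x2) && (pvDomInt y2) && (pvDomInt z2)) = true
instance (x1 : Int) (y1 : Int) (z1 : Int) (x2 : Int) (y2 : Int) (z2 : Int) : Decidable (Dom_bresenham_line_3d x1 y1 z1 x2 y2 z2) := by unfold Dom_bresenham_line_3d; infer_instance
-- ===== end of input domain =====

-- B replaces A's three Bresenham error-accumulator while-loops by a closed-form round-half-up
-- interpolation of each minor coordinate per step (same axis/sign conventions, same output).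

-- ===== PORT A =====
-- A's "while (x1 != x2)" loop of the X-driving branch; fuel = dx steps, which is exactly
-- how many iterations the Python loop performs.
def loopX (x2 xs ys zs dx dy dz : Int) : Nat → Int → Int → Int → Int → Int → List (Int × Int × Int)
  | 0, _, _, _, _, _ => []
  | m + 1, x, y, z, p1, p2 =>
    if x ≠ x2 then
      (x + xs, (if 0 ≤ p1 then y + ys else y), (if 0 ≤ p2 then z + zs else z)) ::
      loopX x2 xs ys zs dx dy dz m (x + xs)
        (if 0 ≤ p1 then y + ys else y) (if 0 ≤ p2 then z + zs else z)
        ((if 0 ≤ p1 then p1 - 2 * dx else p1) + 2 * dy)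
        ((if 0 ≤ p2 then p2 - 2 * dx else p2) + 2 * dz)
    else []

-- A's "while (y1 != y2)" loop of the Y-driving branch
def loopY (y2 xs ys zs dx dy dz : Int) : Nat → Int → Int → Int → Int → Int → List (Int × Int × Int)
  | 0, _, _, _, _, _ => []
  | m + 1, x, y, z, p1, p2 =>
    if y ≠ y2 then
      ((if 0 ≤ p1 then x + xs else x), y + ys, (if 0 ≤ p2 then z + zs else z)) ::
      loopY y2 xs ys zs dx dy dz m
        (if 0 ≤ p1 then x + xs else x) (y + ys) (if 0 ≤ p2 then z + zs else z)
        ((if 0 ≤ p1 then p1 - 2 * dy else p1) + 2 * dx)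
        ((if 0 ≤ p2 then p2 - 2 * dy else p2) + 2 * dz)
    else []

-- A's "while (z1 != z2)" loop of the Z-driving branch
def loopZ (z2 xs ys zs dx dy dz : Int) : Nat → Int → Int → Int → Int → Int → List (Int × Int × Int)
  | 0, _, _, _, _, _ => []
  | m + 1, x, y, z, p1, p2 =>
    if z ≠ z2 then
      ((if 0 ≤ p2 then x + xs else x), (if 0 ≤ p1 then y + ys else y), z + zs) ::
      loopZ z2 xs ys zs dx dy dz m
        (if 0 ≤ p2 then x + xs else x) (if 0 ≤ p1 then y + ys else y) (z + zs)
        ((if 0 ≤ p1 then p1 - 2 * dz else p1) + 2 * dy)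
        ((if 0 ≤ p2 then p2 - 2 * dz else p2) + 2 * dx)
    else []

def bresenham_line_3d (x1 : Int) (y1 : Int) (z1 : Int) (x2 : Int) (y2 : Int) (z2 : Int) : List (Int × Int × Int) :=
  (x1, y1, z1) ::
  (if |x2 - x1| ≥ |y2 - y1| ∧ |x2 - x1| ≥ |z2 - z1| then
    loopX x2 (if x2 > x1 then 1 else -1) (if y2 > y1 then 1 else -1) (if z2 > z1 then 1 else -1)
      |x2 - x1| |y2 - y1| |z2 - z1| (|x2 - x1|).toNat x1 y1 z1
      (2 * |y2 - y1| - |x2 - x1|) (2 * |z2 - z1| - |x2 - x1|)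
  else if |y2 - y1| ≥ |x2 - x1| ∧ |y2 - y1| ≥ |z2 - z1| then
    loopY y2 (if x2 > x1 then 1 else -1) (if y2 > y1 then 1 else -1) (if z2 > z1 then 1 else -1)
      |x2 - x1| |y2 - y1| |z2 - z1| (|y2 - y1|).toNat x1 y1 z1
      (2 * |x2 - x1| - |y2 - y1|) (2 * |z2 - z1| - |y2 - y1|)
  else
    loopZ z2 (if x2 > x1 then 1 else -1) (if y2 > y1 then 1 else -1) (if z2 > z1 then 1 else -1)
      |x2 - x1| |y2 - y1| |z2 - z1| (|z2 - z1|).toNat x1 y1 z1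
      (2 * |y2 - y1| - |z2 - z1|) (2 * |x2 - x1| - |z2 - z1|))

-- ===== PORT B =====
def bresenham_line_3d_alt (x1 : Int) (y1 : Int) (z1 : Int) (x2 : Int) (y2 : Int) (z2 : Int) : List (Int × Int × Int) :=
  if x1 = x2 ∧ y1 = y2 ∧ z1 = z2 then [(x1, y1, z1)]
  else if |x2 - x1| ≥ |y2 - y1| ∧ |x2 - x1| ≥ |z2 - z1| then
    (PySem.List.pyRange 0 (|x2 - x1| + 1) 1).map (fun k =>
      (x1 + (if x2 > x1 then 1 else -1) * k,
       y1 + (if y2 > y1 then 1 else -1) * PySem.Int.floordiv (2 * |y2 - y1| * k + |x2 - x1|) (2 * |x2 - x1|),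
       z1 + (if z2 > z1 then 1 else -1) * PySem.Int.floordiv (2 * |z2 - z1| * k + |x2 - x1|) (2 * |x2 - x1|)))
  else if |y2 - y1| ≥ |x2 - x1| ∧ |y2 - y1| ≥ |z2 - z1| then
    (PySem.List.pyRange 0 (|y2 - y1| + 1) 1).map (fun k =>
      (x1 + (if x2 > x1 then 1 else -1) * PySem.Int.floordiv (2 * |x2 - x1| * k + |y2 - y1|) (2 * |y2 - y1|),
       y1 + (if y2 > y1 then 1 else -1) * k,
       z1 + (if z2 > z1 then 1 else -1) * PySem.Int.floordiv (2 * |z2 - z1| * k + |y2 - y1|) (2 * |y2 - y1|)))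
  else
    (PySem.List.pyRange 0 (|z2 - z1| + 1) 1).map (fun k =>
      (x1 + (if x2 > x1 then 1 else -1) * PySem.Int.floordiv (2 * |x2 - x1| * k + |z2 - z1|) (2 * |z2 - z1|),
       y1 + (if y2 > y1 then 1 else -1) * PySem.Int.floordiv (2 * |y2 - y1| * k + |z2 - z1|) (2 * |z2 - z1|),
       z1 + (if z2 > z1 then 1 else -1) * k))

-- ===== PRECONDITION & SPEC =====
def Spec_bresenham_line_3d (x1 : Int) (y1 : Int) (z1 : Int) (x2 : Int) (y2 : Int) (z2 : Int) (out : List (Int × Int × Int)) : Prop := out = bresenham_line_3d_alt x1 y1 z1 x2 y2 z2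
instance (x1 : Int) (y1 : Int) (z1 : Int) (x2 : Int) (y2 : Int) (z2 : Int) (out : List (Int × Int × Int)) : Decidable (Spec_bresenham_line_3d x1 y1 z1 x2 y2 z2 out) := by unfold Spec_bresenham_line_3d; infer_instance

-- ===== CLAIM (what is proved, stated in full; the proofs are below) =====
def Claim_equal_bresenham_line_3d : Prop := ∀ (x1 : Int) (y1 : Int) (z1 : Int) (x2 : Int) (y2 : Int) (z2 : Int), Dom_bresenham_line_3d x1 y1 z1 x2 y2 z2 → Spec_bresenham_line_3d x1 y1 z1 x2 y2 z2 (bresenham_line_3d x1 y1 z1 x2 y2 z2)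

-- ===== LEMMAS AND PROOFS =====

-- B's minor-coordinate interpolant: number of minor steps after k driving steps
def cfun (n d k : Int) : Int := PySem.Int.floordiv (2 * d * k + n) (2 * n)

lemma cfun_zero (n d : Int) (hn : 0 < n) : cfun n d 0 = 0 := by
  unfold cfun
  rw [mul_zero, zero_add, PySem.Int.floordiv_eq_ediv_of_pos (by omega)]
  exact Int.ediv_eq_zero_of_lt (by omega) (by omega)

lemma cfun_step (n d k : Int) (hn : 0 < n) (hd0 : 0 ≤ d) (hdn : d ≤ n) :
    cfun n d (k + 1) = cfun n d k + (if 0 ≤ 2 * d * (k + 1) - n - 2 * n * cfun n d k then 1 else 0) := by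
  have h2n : (0 : Int) < 2 * n := by omega
  unfold cfun
  rw [PySem.Int.floordiv_eq_ediv_of_pos h2n, PySem.Int.floordiv_eq_ediv_of_pos h2n]
  have hdm := Int.mul_ediv_add_emod (2 * d * k + n) (2 * n)
  set c := (2 * d * k + n) / (2 * n) with hc
  set r := (2 * d * k + n) % (2 * n) with hr
  have hr0 : 0 ≤ r := Int.emod_nonneg _ (by omega)
  have hr2 : r < 2 * n := Int.emod_lt_of_pos _ h2n
  have hnum : 2 * d * (k + 1) + n = (r + 2 * d) + c * (2 * n) := by linarith
  have hcond : (0 ≤ 2 * d * (k + 1) - n - 2 * n * c) ↔ 2 * n ≤ r + 2 * d := by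
    constructor <;> intro h <;> nlinarith
  rw [hnum, Int.add_mul_ediv_right _ _ (by omega : (2 : Int) * n ≠ 0)]
  by_cases hbig : 2 * n ≤ r + 2 * d
  · rw [if_pos (hcond.mpr hbig)]
    have hshape : r + 2 * d = (r + 2 * d - 2 * n) + 1 * (2 * n) := by ring
    rw [hshape, Int.add_mul_ediv_right _ _ (by omega : (2 : Int) * n ≠ 0),
        Int.ediv_eq_zero_of_lt (by omega) (by omega)]
    ring
  · rw [if_neg (fun h => hbig (hcond.mp h)),
        Int.ediv_eq_zero_of_lt (by omega) (by omega)]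
    ring

-- generic form of A's three loops: `pack` assembles (x, y, z) from (driving, minor1, minor2)
def loopA (pack : Int → Int → Int → Int × Int × Int) (a2 sa sb sc da db dc : Int) :
    Nat → Int → Int → Int → Int → Int → List (Int × Int × Int)
  | 0, _, _, _, _, _ => []
  | m + 1, a, b, c, p1, p2 =>
    if a ≠ a2 then
      pack (a + sa) (if 0 ≤ p1 then b + sb else b) (if 0 ≤ p2 then c + sc else c) ::
      loopA pack a2 sa sb sc da db dc m (a + sa)
        (if 0 ≤ p1 then b + sb else b) (if 0 ≤ p2 then c + sc else c)
        ((if 0 ≤ p1 then p1 - 2 * da else p1) + 2 * db)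
        ((if 0 ≤ p2 then p2 - 2 * da else p2) + 2 * dc)
    else []

lemma loopX_eq_loopA (x2 xs ys zs dx dy dz : Int) :
    ∀ (n : Nat) (x y z p1 p2 : Int),
      loopX x2 xs ys zs dx dy dz n x y z p1 p2
        = loopA (fun a b c => (a, b, c)) x2 xs ys zs dx dy dz n x y z p1 p2 := by
  intro n
  induction n with
  | zero => intro x y z p1 p2; simp [loopX, loopA]
  | succ m ih => intro x y z p1 p2; simp only [loopX, loopA, ih]

lemma loopY_eq_loopA (y2 xs ys zs dx dy dz : Int) :
    ∀ (n : Nat) (x y z p1 p2 : Int),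
      loopY y2 xs ys zs dx dy dz n x y z p1 p2
        = loopA (fun a b c => (b, a, c)) y2 ys xs zs dy dx dz n y x z p1 p2 := by
  intro n
  induction n with
  | zero => intro x y z p1 p2; simp [loopY, loopA]
  | succ m ih => intro x y z p1 p2; simp only [loopY, loopA, ih]

lemma loopZ_eq_loopA (z2 xs ys zs dx dy dz : Int) :
    ∀ (n : Nat) (x y z p1 p2 : Int),
      loopZ z2 xs ys zs dx dy dz n x y z p1 p2
        = loopA (fun a b c => (c, b, a)) z2 zs ys xs dz dy dx n z y x p1 p2 := by
  intro n
  induction n with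
  | zero => intro x y z p1 p2; simp [loopZ, loopA]
  | succ m ih => intro x y z p1 p2; simp only [loopZ, loopA, ih]

lemma loopA_eq (pack : Int → Int → Int → Int × Int × Int)
    (a2 sa sb sc da db dc a1 b1 c1 : Int)
    (hs1 : sa * da = a2 - a1) (hs2 : sa = 1 ∨ sa = -1)
    (hdb0 : 0 ≤ db) (hdbn : db ≤ da) (hdc0 : 0 ≤ dc) (hdcn : dc ≤ da) (hpos : 0 < da) :
    ∀ (m : Nat) (k : Int), 0 ≤ k → k + (m : Int) = da →
      loopA pack a2 sa sb sc da db dc m (a1 + sa * k)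
          (b1 + sb * cfun da db k) (c1 + sc * cfun da dc k)
          (2 * db * (k + 1) - da - 2 * da * cfun da db k)
          (2 * dc * (k + 1) - da - 2 * da * cfun da dc k)
        = (PySem.List.pyRange (k + 1) (da + 1) 1).map (fun j =>
            pack (a1 + sa * j) (b1 + sb * cfun da db j) (c1 + sc * cfun da dc j)) := by
  intro m
  induction m with
  | zero =>
      intro k hk hkm
      have hkda : k = da := by push_cast at hkm; omega
      rw [PySem.List.pyRange_one_eq_nil (by omega)]
      simp [loopA]
  | succ m ih =>
      intro k hk hkm
      have hklt : k < da := by push_cast at hkm; omega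
      have hne : a1 + sa * k ≠ a2 := by
        intro heq
        rcases hs2 with h | h <;> rw [h] at heq hs1 <;> simp at heq hs1 <;> omega
      have Hb : (if 0 ≤ 2 * db * (k + 1) - da - 2 * da * cfun da db k
                 then b1 + sb * cfun da db k + sb else b1 + sb * cfun da db k)
                = b1 + sb * cfun da db (k + 1) := by
        rw [cfun_step da db k hpos hdb0 hdbn]; split_ifs <;> ring
      have Hc : (if 0 ≤ 2 * dc * (k + 1) - da - 2 * da * cfun da dc k
                 then c1 + sc * cfun da dc k + sc else c1 + sc * cfun da dc k)
                = c1 + sc * cfun da dc (k + 1) := by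
        rw [cfun_step da dc k hpos hdc0 hdcn]; split_ifs <;> ring
      have Hp1 : ((if 0 ≤ 2 * db * (k + 1) - da - 2 * da * cfun da db k
                   then 2 * db * (k + 1) - da - 2 * da * cfun da db k - 2 * da
                   else 2 * db * (k + 1) - da - 2 * da * cfun da db k) + 2 * db)
                 = 2 * db * (k + 1 + 1) - da - 2 * da * cfun da db (k + 1) := by
        rw [cfun_step da db k hpos hdb0 hdbn]; split_ifs <;> ring
      have Hp2 : ((if 0 ≤ 2 * dc * (k + 1) - da - 2 * da * cfun da dc k
                   then 2 * dc * (k + 1) - da - 2 * da * cfun da dc k - 2 * da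
                   else 2 * dc * (k + 1) - da - 2 * da * cfun da dc k) + 2 * dc)
                 = 2 * dc * (k + 1 + 1) - da - 2 * da * cfun da dc (k + 1) := by
        rw [cfun_step da dc k hpos hdc0 hdcn]; split_ifs <;> ring
      rw [show loopA pack a2 sa sb sc da db dc (m + 1) (a1 + sa * k)
            (b1 + sb * cfun da db k) (c1 + sc * cfun da dc k)
            (2 * db * (k + 1) - da - 2 * da * cfun da db k)
            (2 * dc * (k + 1) - da - 2 * da * cfun da dc k)
          = _ from rfl]
      simp only [loopA]
      rw [if_pos hne, Hb, Hc, Hp1, Hp2,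
          show a1 + sa * k + sa = a1 + sa * (k + 1) from by ring]
      rw [PySem.List.pyRange_one_cons (by omega : k + 1 < da + 1)]
      simp only [List.map_cons]
      rw [ih (k + 1) (by omega) (by push_cast at hkm ⊢; omega)]

lemma pvSignMulAbs (u v : Int) : (if v > u then (1 : Int) else -1) * |v - u| = v - u := by
  rcases lt_trichotomy u v with h | h | h
  · rw [if_pos h, one_mul, abs_of_pos (by omega)]
  · subst h; simp
  · rw [if_neg (by omega), abs_of_neg (by omega)]; ring

lemma branch_eq (pack : Int → Int → Int → Int × Int × Int)
    (a1 b1 c1 a2 sb sc db dc : Int)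
    (hdb0 : 0 ≤ db) (hdbn : db ≤ |a2 - a1|) (hdc0 : 0 ≤ dc) (hdcn : dc ≤ |a2 - a1|)
    (hpos : 0 < |a2 - a1|) :
    pack a1 b1 c1 ::
      loopA pack a2 (if a2 > a1 then 1 else -1) sb sc (|a2 - a1|) db dc
        (|a2 - a1|).toNat a1 b1 c1 (2 * db - |a2 - a1|) (2 * dc - |a2 - a1|)
    = (PySem.List.pyRange 0 (|a2 - a1| + 1) 1).map (fun k =>
        pack (a1 + (if a2 > a1 then 1 else -1) * k)
             (b1 + sb * cfun (|a2 - a1|) db k) (c1 + sc * cfun (|a2 - a1|) dc k)) := by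
  have hs1 : (if a2 > a1 then (1 : Int) else -1) * |a2 - a1| = a2 - a1 := pvSignMulAbs a1 a2
  have hs2 : (if a2 > a1 then (1 : Int) else -1) = 1 ∨ (if a2 > a1 then (1 : Int) else -1) = -1 := by
    split_ifs <;> simp
  have h0b : cfun (|a2 - a1|) db 0 = 0 := cfun_zero _ _ hpos
  have h0c : cfun (|a2 - a1|) dc 0 = 0 := cfun_zero _ _ hpos
  have H := loopA_eq pack a2 (if a2 > a1 then 1 else -1) sb sc (|a2 - a1|) db dc a1 b1 c1
    hs1 hs2 hdb0 hdbn hdc0 hdcn hpos (|a2 - a1|).toNat 0 le_rfl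
    (by rw [Int.toNat_of_nonneg (le_of_lt hpos)]; ring)
  simp only [h0b, h0c, mul_zero, add_zero, zero_add, mul_one, sub_zero] at H
  rw [PySem.List.pyRange_one_cons (by omega : (0 : Int) < |a2 - a1| + 1)]
  simp only [List.map_cons, h0b, h0c, mul_zero, add_zero, zero_add]
  rw [H]

-- ===== VERDICT (by name: the statement is the Claim_ definition above) =====
theorem bresenham_line_3d_spec : Claim_equal_bresenham_line_3d := by
  intro x1 y1 z1 x2 y2 z2 _
  show bresenham_line_3d x1 y1 z1 x2 y2 z2 = bresenham_line_3d_alt x1 y1 z1 x2 y2 z2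
  unfold bresenham_line_3d bresenham_line_3d_alt
  by_cases heq : x1 = x2 ∧ y1 = y2 ∧ z1 = z2
  · obtain ⟨h1, h2, h3⟩ := heq
    subst h1; subst h2; subst h3
    simp [loopX]
  · rw [if_neg heq]
    have hx0 := abs_nonneg (x2 - x1)
    have hy0 := abs_nonneg (y2 - y1)
    have hz0 := abs_nonneg (z2 - z1)
    have hne0 : ¬(|x2 - x1| = 0 ∧ |y2 - y1| = 0 ∧ |z2 - z1| = 0) := by
      rintro ⟨hx, hy, hz⟩
      rw [abs_eq_zero, sub_eq_zero] at hx hy hz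
      exact heq ⟨hx.symm, hy.symm, hz.symm⟩
    by_cases hX : |x2 - x1| ≥ |y2 - y1| ∧ |x2 - x1| ≥ |z2 - z1|
    · rw [if_pos hX, if_pos hX]
      have hpos : 0 < |x2 - x1| := by
        rcases hX with ⟨ha, hb⟩; omega
      have H := branch_eq (fun a b c => (a, b, c)) x1 y1 z1 x2
        (if y2 > y1 then 1 else -1) (if z2 > z1 then 1 else -1)
        (|y2 - y1|) (|z2 - z1|) hy0 hX.1 hz0 hX.2 hpos
      simp only [] at H
      rw [loopX_eq_loopA, H]
      simp only [cfun]
    · rw [if_neg hX, if_neg hX]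
      by_cases hY : |y2 - y1| ≥ |x2 - x1| ∧ |y2 - y1| ≥ |z2 - z1|
      · rw [if_pos hY, if_pos hY]
        have hpos : 0 < |y2 - y1| := by
          rcases hY with ⟨ha, hb⟩
          by_contra h
          push Not at hX
          omega
        have H := branch_eq (fun a b c => (b, a, c)) y1 x1 z1 y2
          (if x2 > x1 then 1 else -1) (if z2 > z1 then 1 else -1)
          (|x2 - x1|) (|z2 - z1|) hx0 hY.1 hz0 hY.2 hpos
        simp only [] at H
        rw [loopY_eq_loopA, H]
        simp only [cfun]
      · rw [if_neg hY, if_neg hY]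
        push Not at hX hY
        have hzy : |y2 - y1| ≤ |z2 - z1| := by omega
        have hzx : |x2 - x1| ≤ |z2 - z1| := by omega
        have hpos : 0 < |z2 - z1| := by omega
        have H := branch_eq (fun a b c => (c, b, a)) z1 y1 x1 z2
          (if y2 > y1 then 1 else -1) (if x2 > x1 then 1 else -1)
          (|y2 - y1|) (|x2 - x1|) hy0 hzy hx0 hzx hpos
        simp only [] at H
        rw [loopZ_eq_loopA, H]
        simp only [cfun]
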